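-- pv_equiv track=rewrite | github.com/loponly/ai-video-gen | tools/script/generate_viral_script.py | _generate_timing_notes
-- ===== SOURCE A (Python) =====
-- from typing import Dict, Any
--
-- def _generate_timing_notes(duration: int, structure: list) -> Dict[str, str]:
--     """Generate timing notes for script sections."""
--
--     section_count = len(structure)
--     base_time = duration // section_count
--
--     timing_notes = {}
--     current_time = 0
--
--     for i, section in enumerate(structure):
--         if i == 0:  # Hook gets less time
--             section_time = min(5, base_time)
--         elif i == len(structure) - 1:  # CTA gets remaining time
--             section_time = duration - current_time
--         else:
--             section_time = base_time
--
--         timing_notes[section] = f"{current_time}-{current_time + section_time}s"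
--         current_time += section_time
--
--     return timing_notes
-- ===== SOURCE B (Python) =====
-- def _generate_timing_notes(duration: int, structure: list):
--     """Generate timing notes for script sections."""
--     n = len(structure)
--     base = duration // n
--     first = min(5, base)
--     if n == 1:
--         durs = [first]
--     else:
--         durs = [first] + [base] * (n - 2) + [duration - first - base * (n - 2)]
--     starts = [0] + [first + base * i for i in range(n - 1)]
--     return {s: f"{st}-{st + d}s" for s, st, d in zip(structure, starts, durs)}
-- ===== Notes on version B (the rewrite author's own statement) =====
-- stated objective: alternative
-- what changed: Replaces A's single stateful loop threading current_time through a dict with a compute-table pipeline: closed-form duration and start-offset lists ([first]+[base]*(n-2)+[remainder], starts = [0]+[first+base*i ...]) zipped with the section names into a dict comprehension.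
import Mathlib
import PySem

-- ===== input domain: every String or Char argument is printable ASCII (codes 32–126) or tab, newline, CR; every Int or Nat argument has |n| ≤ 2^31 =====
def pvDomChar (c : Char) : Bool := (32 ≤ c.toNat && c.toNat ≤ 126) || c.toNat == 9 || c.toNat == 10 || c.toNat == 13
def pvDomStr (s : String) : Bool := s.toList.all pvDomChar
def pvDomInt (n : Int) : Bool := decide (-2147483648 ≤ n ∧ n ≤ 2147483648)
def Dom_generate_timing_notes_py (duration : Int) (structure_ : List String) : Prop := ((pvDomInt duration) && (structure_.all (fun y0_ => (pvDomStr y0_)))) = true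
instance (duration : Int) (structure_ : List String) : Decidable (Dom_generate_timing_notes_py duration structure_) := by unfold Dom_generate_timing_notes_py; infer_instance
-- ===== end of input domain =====

-- B replaces A's stateful accumulator loop with closed-form duration/start tables zipped into the dict (alternative decomposition, same cost).


-- shared f-string `f"{a}-{b}s"`
def pvFmt (a b : Int) : String := PySem.Int.toStr a ++ "-" ++ PySem.Int.toStr b ++ "s"

-- ===== PORT A =====
-- the `for i, section in enumerate(structure)` loop, threading (timing_notes, current_time)
def pvAloop (duration baseTime : Int) (n : Int) :
    List (Int × String) → PySem.Dict String String → Int → PySem.Dict String String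
  | [], d, _ => d
  | (i, sec) :: rest, d, c =>
    let st := if i = 0 then min 5 baseTime
              else if i = n - 1 then duration - c
              else baseTime
    pvAloop duration baseTime n rest (d.insert sec (pvFmt c (c + st))) (c + st)

def generate_timing_notes_py (duration : Int) (structure_ : List String) : List (String × String) :=
  let sectionCount := PySem.List.len structure_
  let baseTime := PySem.Int.floordiv duration sectionCount   -- ZeroDivisionError on [], excluded by Pre_
  (pvAloop duration baseTime sectionCount (PySem.List.enumerate structure_ 0) PySem.Dict.empty 0).items

-- ===== PORT B =====
def generate_timing_notes_py_alt (duration : Int) (structure_ : List String) : List (String × String) :=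
  let n := structure_.length
  let base := PySem.Int.floordiv duration (PySem.List.len structure_)
  let first := min 5 base
  let durs : List Int :=
    if n = 1 then [first]
    else [first] ++ List.replicate (n - 2) base ++ [duration - first - base * ((n : Int) - 2)]
  let starts : List Int := [0] ++ (PySem.List.pyRange 0 ((n : Int) - 1) 1).map (fun i => first + base * i)
  ((structure_.zip (starts.zip durs)).foldl
      (fun d p => d.insert p.1 (pvFmt p.2.1 (p.2.1 + p.2.2))) PySem.Dict.empty).items

-- ===== PRECONDITION & SPEC =====
-- Pre_ excludes only the empty structure, on which A raises ZeroDivisionError (duration // 0).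
def Pre_generate_timing_notes_py (duration : Int) (structure_ : List String) : Prop := structure_ ≠ []
instance (duration : Int) (structure_ : List String) : Decidable (Pre_generate_timing_notes_py duration structure_) := by unfold Pre_generate_timing_notes_py; infer_instance
def pvWitness_generate_timing_notes_py : Int × List String := (60, ["hook", "body", "cta"])

def Spec_generate_timing_notes_py (duration : Int) (structure_ : List String) (out : List (String × String)) : Prop := out = generate_timing_notes_py_alt duration structure_
instance (duration : Int) (structure_ : List String) (out : List (String × String)) : Decidable (Spec_generate_timing_notes_py duration structure_ out) := by unfold Spec_generate_timing_notes_py; infer_instance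

-- ===== CLAIM (what is proved, stated in full; the proofs are below) =====
def Claim_equal_generate_timing_notes_py : Prop := ∀ (duration : Int) (structure_ : List String), Dom_generate_timing_notes_py duration structure_ → Pre_generate_timing_notes_py duration structure_ → Spec_generate_timing_notes_py duration structure_ (generate_timing_notes_py duration structure_)

-- ===== LEMMAS AND PROOFS =====

-- common row trace for the tail sections (indices 1 .. n-1): each middle section
-- occupies [c, c+base), the last section [c, duration)
def pvTailRows (duration base : Int) : Int → List String → List (String × String)
  | _, [] => []
  | c, [s] => [(s, pvFmt c duration)]
  | c, s :: r :: rest => (s, pvFmt c (c + base)) :: pvTailRows duration base (c + base) (r :: rest)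

def pvIns (d : PySem.Dict String String) (p : String × String) : PySem.Dict String String :=
  d.insert p.1 p.2

-- one-step equations for pvAloop (controlled unfolding)
lemma pvAloop_nil (duration base n : Int) (d : PySem.Dict String String) (c : Int) :
    pvAloop duration base n [] d c = d := rfl

lemma pvAloop_cons (duration base n i : Int) (s : String) (rest : List (Int × String))
    (d : PySem.Dict String String) (c : Int) :
    pvAloop duration base n ((i, s) :: rest) d c =
      pvAloop duration base n rest
        (d.insert s (pvFmt c (c + (if i = 0 then min 5 base
            else if i = n - 1 then duration - c else base))))
        (c + (if i = 0 then min 5 base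
            else if i = n - 1 then duration - c else base)) := rfl

-- A's loop over the tail equals folding pvTailRows
lemma pvAloop_eq_tailRows (duration base : Int) (n : Int) :
    ∀ (rest : List String) (d : PySem.Dict String String) (c : Int) (k : Nat),
      1 ≤ k → (k : Int) + rest.length = n →
      pvAloop duration base n (PySem.List.enumerate rest (k : Int)) d c
        = (pvTailRows duration base c rest).foldl pvIns d := by
  intro rest
  induction rest with
  | nil => intro d c k _ _; simp [PySem.List.enumerate_nil, pvAloop, pvTailRows]
  | cons s rest ih =>
    intro d c k hk hn
    cases rest with
    | nil =>
      have hi0 : (k : Int) ≠ 0 := by omega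
      have hlast : (k : Int) = n - 1 := by simp at hn; omega
      rw [PySem.List.enumerate_cons, PySem.List.enumerate_nil, pvAloop_cons,
        if_neg hi0, if_pos hlast, pvAloop_nil]
      simp only [pvTailRows, List.foldl, pvIns]
      have : c + (duration - c) = duration := by ring
      rw [this]
    | cons r rest' =>
      have hi0 : (k : Int) ≠ 0 := by omega
      have hmid : (k : Int) ≠ n - 1 := by
        push_cast [List.length_cons] at hn; omega
      have hn' : ((k + 1 : Nat) : Int) + (r :: rest').length = n := by
        push_cast [List.length_cons] at hn ⊢; omega
      rw [PySem.List.enumerate_cons, pvAloop_cons, if_neg hi0, if_neg hmid]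
      have hcast : (k : Int) + 1 = ((k + 1 : Nat) : Int) := by push_cast; ring
      rw [hcast, ih _ (c + base) (k + 1) (by omega) hn']
      simp only [pvTailRows, List.foldl, pvIns]

-- B's zipped tail equals folding pvTailRows
lemma pvZip_eq_tailRows (duration base first : Int) (n : Int) :
    ∀ (rest : List String) (d : PySem.Dict String String) (a : Int),
      0 ≤ a → rest ≠ [] → a + 1 + rest.length = n →
      (rest.zip (((PySem.List.pyRange a (n - 1) 1).map (fun i => first + base * i)).zip
          (List.replicate (rest.length - 1) base ++ [duration - first - base * (n - 2)]))).foldl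
        (fun d p => d.insert p.1 (pvFmt p.2.1 (p.2.1 + p.2.2))) d
      = (pvTailRows duration base (first + base * a) rest).foldl pvIns d := by
  intro rest
  induction rest with
  | nil => intro d a _ h _; exact absurd rfl h
  | cons s rest ih =>
    intro d a ha _ hn
    cases rest with
    | nil =>
      have hab : a < n - 1 := by simp at hn; omega
      rw [PySem.List.pyRange_one_cons hab]
      have hend : a + 1 = n - 1 := by simp at hn; omega
      have hemp : PySem.List.pyRange (a + 1) (n - 1) 1 = [] := by
        rw [hend]; simp [PySem.List.pyRange_one]
      have h1 : first + base * a + (duration - first - base * (n - 2)) = duration := by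
        have : a = n - 2 := by omega
        rw [this]; ring
      simp only [hemp, List.map_cons, List.map_nil, List.length_cons, List.length_nil,
        List.zip, List.zipWith_cons_cons, List.zipWith_nil_right, List.foldl,
        pvTailRows, pvIns, Nat.zero_add, List.replicate, List.nil_append, h1]
    | cons r rest' =>
      have hab : a < n - 1 := by simp at hn; omega
      rw [PySem.List.pyRange_one_cons hab]
      have hrep : (s :: r :: rest').length - 1 = ((r :: rest').length - 1) + 1 := by
        simp
      rw [hrep, List.replicate_succ]
      simp only [List.map_cons, List.cons_append, List.zip, List.zipWith_cons_cons, List.foldl,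
        pvTailRows, pvIns]
      have hrec := ih (d.insert s (pvFmt (first + base * a) (first + base * a + base)))
        (a + 1) (by omega) (by simp) (by simp at hn ⊢; omega)
      have hc : first + base * (a + 1) = first + base * a + base := by ring
      rw [hc] at hrec
      exact hrec

lemma pvMain (duration : Int) (s0 : String) (rest : List String) :
    generate_timing_notes_py duration (s0 :: rest)
      = generate_timing_notes_py_alt duration (s0 :: rest) := by
  cases rest with
  | nil =>
    unfold generate_timing_notes_py generate_timing_notes_py_alt
    simp [pvAloop, PySem.List.enumerate_cons, PySem.List.enumerate_nil]
  | cons r rest' =>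
    unfold generate_timing_notes_py generate_timing_notes_py_alt
    simp only [PySem.List.len_eq, List.length_cons]
    -- A side: first iteration is the i = 0 branch, then pvAloop_eq_tailRows on the tail
    rw [PySem.List.enumerate_cons, pvAloop_cons, if_pos rfl]
    rw [show ((0 : Int) + 1) = ((1 : Nat) : Int) by norm_num]
    rw [pvAloop_eq_tailRows duration
      (PySem.Int.floordiv duration (((rest'.length + 1 + 1 : Nat) : Int)))
      (((rest'.length + 1 + 1 : Nat) : Int)) (r :: rest') _ _ 1 (le_refl 1)
      (by push_cast [List.length_cons]; ring)]
    -- B side: head of the zip, then pvZip_eq_tailRows on the tail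
    rw [if_neg (by simp : ¬ (rest'.length + 1 + 1 = 1))]
    have hrepl : rest'.length + 1 + 1 - 2 = (r :: rest').length - 1 := by simp
    rw [hrepl]
    simp only [List.cons_append, List.nil_append, List.zip_cons_cons, List.foldl_cons]
    have hb := pvZip_eq_tailRows duration
      (PySem.Int.floordiv duration (((rest'.length + 1 + 1 : Nat) : Int)))
      (min 5 (PySem.Int.floordiv duration (((rest'.length + 1 + 1 : Nat) : Int))))
      (((rest'.length + 1 + 1 : Nat) : Int)) (r :: rest')
      (PySem.Dict.empty.insert s0 (pvFmt 0 (0 + min 5 (PySem.Int.floordiv duration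
        (((rest'.length + 1 + 1 : Nat) : Int)))))) 0
      (le_refl 0) (by simp) (by push_cast [List.length_cons]; ring)
    have h0 : (min 5 (PySem.Int.floordiv duration (((rest'.length + 1 + 1 : Nat) : Int))))
        + (PySem.Int.floordiv duration (((rest'.length + 1 + 1 : Nat) : Int))) * 0
        = 0 + min 5 (PySem.Int.floordiv duration (((rest'.length + 1 + 1 : Nat) : Int))) := by
      ring
    rw [h0] at hb
    rw [hb]

-- ===== VERDICT (by name: the statement is the Claim_ definition above) =====
theorem generate_timing_notes_py_spec : Claim_equal_generate_timing_notes_py := by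
  intro duration structure_ _ hpre
  unfold Spec_generate_timing_notes_py
  cases structure_ with
  | nil => exact absurd rfl hpre
  | cons s0 rest => exact pvMain duration s0 rest
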